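-- pv_equiv track=rewrite | github.com/VremeniNet/itmo_python | Laboratory work 2/main.py | guess_linear
-- ===== SOURCE A (Python) =====
-- from typing import Iterable, List, Literal, Optional, Tuple
--
-- def guess_linear(target: int, pool: Iterable[int]) -> Optional[Tuple[int, int]]:
--     """Угадать число медленным перебором (инкрементом).
--
--     Перебирает значения по возрастанию от минимального до максимального
--     в предоставленном пуле (даже если список был неотсортирован).
--     На каждой проверке увеличивает счётчик попыток на 1.
--
--     Args:
--         target: Загаданное число, которое нужно угадать.
--         pool: Коллекция допустимых значений (без повторов).
--
--     Returns:
--         (угаданное_число, число_попыток) или None, если target отсутствует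
--         в пуле либо число не удалось найти (что маловероятно при корректных данных).
--     """
--     s = set(pool)
--     if target not in s:
--         return None
--
--     attempts = 0
--     current = min(s)
--     finish = max(s)
--
--     while current <= finish:
--         attempts += 1
--         if current == target:
--             return current, attempts
--         current += 1
--
--     return None
-- ===== SOURCE B (Python) =====
-- def guess_linear(target, pool):
--     """Same result as A: closed form instead of the increment loop."""
--     lst = list(pool)
--     if target not in lst:
--         return None
--     return target, target - min(lst) + 1
-- ===== Notes on version B (the rewrite author's own statement) =====
-- stated objective: simpler
-- what changed: Replaced the increment-by-one search loop from min to max with the closed form (target, target - min(pool) + 1) after a membership check.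
import Mathlib
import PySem

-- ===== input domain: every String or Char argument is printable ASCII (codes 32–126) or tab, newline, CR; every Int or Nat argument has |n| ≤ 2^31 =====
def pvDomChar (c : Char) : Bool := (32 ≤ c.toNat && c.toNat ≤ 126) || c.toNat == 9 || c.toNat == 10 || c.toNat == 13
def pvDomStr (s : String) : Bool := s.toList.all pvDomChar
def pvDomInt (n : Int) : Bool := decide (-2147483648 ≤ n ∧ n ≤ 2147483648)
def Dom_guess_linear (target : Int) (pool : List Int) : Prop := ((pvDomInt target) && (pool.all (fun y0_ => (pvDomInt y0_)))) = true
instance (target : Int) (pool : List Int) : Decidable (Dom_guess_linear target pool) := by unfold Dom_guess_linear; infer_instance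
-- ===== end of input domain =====

-- B replaces A's increment-by-one search loop with the closed form (target, target - min(pool) + 1); objective: simpler (return value only — neither mutates its arguments).


-- ===== PORT A =====
-- the 'while current <= finish' loop of A; fuel is the remaining range length
def guessLoopA (target finish : Int) (current attempts : Int) : Option (Int × Int) :=
  if h : current ≤ finish then
    let attempts' := attempts + 1
    if current = target then some (current, attempts')
    else guessLoopA target finish (current + 1) attempts'
  else none
termination_by (finish + 1 - current).toNat
decreasing_by omega

def guess_linear (target : Int) (pool : List Int) : Option (Int × Int) :=
  let s : PySem.Set Int := PySem.Set.ofList pool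
  if ¬ PySem.Set.contains s target then none
  else
    match PySem.List.min? s (fun x => x), PySem.List.max? s (fun x => x) with
    | some current, some finish => guessLoopA target finish current 0
    | _, _ => none  -- unreachable (s is nonempty here): min/max of the empty set would raise

-- ===== PORT B =====
def guess_linear_alt (target : Int) (pool : List Int) : Option (Int × Int) :=
  if pool.contains target then
    (PySem.List.min? pool (fun x => x)).map (fun m => (target, target - m + 1))
  else none

-- ===== PRECONDITION & SPEC =====
def Spec_guess_linear (target : Int) (pool : List Int) (out : Option (Int × Int)) : Prop := out = guess_linear_alt target pool
instance (target : Int) (pool : List Int) (out : Option (Int × Int)) : Decidable (Spec_guess_linear target pool out) := by unfold Spec_guess_linear; infer_instance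

-- ===== CLAIM (what is proved, stated in full; the proofs are below) =====
def Claim_equal_guess_linear : Prop := ∀ (target : Int) (pool : List Int), Dom_guess_linear target pool → Spec_guess_linear target pool (guess_linear target pool)

-- ===== LEMMAS AND PROOFS =====

-- the increment loop reaches target in exactly (target - current) + 1 further checks
theorem guessLoopA_hits (target finish : Int) :
    ∀ current attempts : Int, current ≤ target → target ≤ finish →
      guessLoopA target finish current attempts = some (target, attempts + (target - current) + 1) := by
  intro current
  have hmeas : ∀ n : Nat, ∀ current attempts : Int, (target - current).toNat = n →
      current ≤ target → target ≤ finish →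
      guessLoopA target finish current attempts = some (target, attempts + (target - current) + 1) := by
    intro n
    induction n with
    | zero =>
      intro current attempts hn h1 h2
      have : current = target := by omega
      subst this
      rw [guessLoopA]
      rw [dif_pos h2, if_pos rfl]
      congr 2
      omega
    | succ k ih =>
      intro current attempts hn h1 h2
      have hlt : current < target := by omega
      rw [guessLoopA]
      have hle : current ≤ finish := by omega
      simp only [dif_pos hle]
      rw [if_neg (by omega)]
      rw [ih (current + 1) (attempts + 1) (by omega) (by omega) h2]
      congr 1
      ext <;> omega
  intro attempts h1 h2
  exact hmeas (target - current).toNat current attempts rfl h1 h2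

-- a first-extremal min?/max? with identity key is determined by the element set
theorem min?_id_eq_of_mem_iff (xs ys : List Int) (h : ∀ x, x ∈ xs ↔ x ∈ ys) :
    PySem.List.min? xs (fun x => x) = PySem.List.min? ys (fun x => x) := by
  cases hx : PySem.List.min? xs (fun x => x) with
  | none =>
    rw [PySem.List.min?_eq_none_iff] at hx
    cases hy : PySem.List.min? ys (fun x => x) with
    | none => rfl
    | some m =>
      have := PySem.List.min?_mem hy
      rw [← h] at this
      simp [hx] at this
  | some m =>
    cases hy : PySem.List.min? ys (fun x => x) with
    | none =>
      rw [PySem.List.min?_eq_none_iff] at hy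
      have := PySem.List.min?_mem hx
      rw [h] at this
      simp [hy] at this
    | some m' =>
      have hm := PySem.List.min?_mem hx
      have hm' := PySem.List.min?_mem hy
      have h1 := PySem.List.min?_isMin hx m' ((h m').mpr hm')
      have h2 := PySem.List.min?_isMin hy m ((h m).mp hm)
      simp only [Option.some.injEq]
      omega

-- ===== VERDICT (by name: the statement is the Claim_ definition above) =====
theorem guess_linear_spec : Claim_equal_guess_linear := by
  intro target pool _
  unfold Spec_guess_linear guess_linear guess_linear_alt
  simp only []
  by_cases hmem : target ∈ pool
  · have hmemS : target ∈ PySem.Set.ofList pool := by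
      rw [PySem.Set.mem_ofList]; exact hmem
    have hiff : ∀ x, x ∈ (PySem.Set.ofList pool : List Int) ↔ x ∈ pool := by
      intro x; simp [PySem.Set.mem_ofList]
    rw [if_neg (by simp [PySem.Set.contains, PySem.Set.mem_ofList, hmem])]
    have hminS : ∃ m, PySem.List.min? (PySem.Set.ofList pool) (fun x => x) = some m := by
      cases hx : PySem.List.min? (PySem.Set.ofList pool) (fun x => x) with
      | none => rw [PySem.List.min?_eq_none_iff] at hx; rw [hx] at hmemS; simp at hmemS
      | some m => exact ⟨m, rfl⟩
    have hmaxS : ∃ M, PySem.List.max? (PySem.Set.ofList pool) (fun x => x) = some M := by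
      cases hx : PySem.List.max? (PySem.Set.ofList pool) (fun x => x) with
      | none => rw [PySem.List.max?_eq_none_iff] at hx; rw [hx] at hmemS; simp at hmemS
      | some M => exact ⟨M, rfl⟩
    obtain ⟨m, hm⟩ := hminS
    obtain ⟨M, hM⟩ := hmaxS
    rw [hm, hM]
    show guessLoopA target M m 0 = _
    have hmt : m ≤ target := PySem.List.min?_isMin hm target hmemS
    have htM : target ≤ M := PySem.List.max?_isMax hM target hmemS
    rw [guessLoopA_hits target M m 0 hmt htM]
    rw [if_pos (by simp [hmem])]
    rw [min?_id_eq_of_mem_iff pool (PySem.Set.ofList pool) (fun x => (hiff x).symm), hm]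
    simp only [Option.map_some]
    congr 1
    ext <;> omega
  · rw [if_pos (by simp [PySem.Set.contains, PySem.Set.mem_ofList, hmem])]
    rw [if_neg (by simp [hmem])]
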